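-- pv_equiv track=rewrite | github.com/tasosa2/CS-2302 | Sosa_Thomas_PracticeExam1.py | sum_until
-- ===== SOURCE A (Python) =====
-- def sum_until(L,i):
--     su = 0
--
--     for num in L:
--         if num != i:
--             su += num
--         else:
--             break
--
--     return su
-- ===== SOURCE B (Python) =====
-- def sum_until(L, i):
--     if i in L:
--         return sum(L[:L.index(i)])
--     return sum(L)
-- ===== Notes on version B (the rewrite author's own statement) =====
-- stated objective: simpler
-- what changed: Replaced the explicit accumulate-and-break loop by finding the sentinel's first index and summing the prefix slice (or the whole list if absent) with library calls.
import Mathlib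
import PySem

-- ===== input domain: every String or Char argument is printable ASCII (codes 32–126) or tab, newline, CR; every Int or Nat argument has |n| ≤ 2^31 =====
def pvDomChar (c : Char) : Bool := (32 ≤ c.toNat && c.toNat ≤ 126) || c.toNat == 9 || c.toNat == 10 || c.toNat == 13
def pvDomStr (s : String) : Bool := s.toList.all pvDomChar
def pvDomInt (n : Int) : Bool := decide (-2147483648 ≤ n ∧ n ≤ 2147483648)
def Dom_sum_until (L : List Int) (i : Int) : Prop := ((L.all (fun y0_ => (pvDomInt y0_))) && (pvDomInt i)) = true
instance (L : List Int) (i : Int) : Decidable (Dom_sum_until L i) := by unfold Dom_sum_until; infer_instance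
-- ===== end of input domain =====

-- B replaces A's accumulate-and-break loop by index-the-sentinel + sum-the-prefix-slice (simpler decomposition, same cost).

-- ===== PORT A =====
-- loop with accumulator and break, transcribed as structural recursion
def sumUntilGo (L : List Int) (i : Int) (su : Int) : Int :=
  match L with
  | [] => su
  | num :: rest => if num ≠ i then sumUntilGo rest i (su + num) else su

def sum_until (L : List Int) (i : Int) : Int := sumUntilGo L i 0

-- ===== PORT B =====
-- B: if i in L: sum(L[:L.index(i)]) else sum(L)
def sum_until_alt (L : List Int) (i : Int) : Int :=
  if L.contains i then
    match PySem.List.index? L i with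
    | some k => (PySem.List.slice L none (some (k : Int))).sum
    | none => L.sum
  else L.sum

-- ===== PRECONDITION & SPEC =====
def Spec_sum_until (L : List Int) (i : Int) (out : Int) : Prop := out = sum_until_alt L i
instance (L : List Int) (i : Int) (out : Int) : Decidable (Spec_sum_until L i out) := by unfold Spec_sum_until; infer_instance

-- ===== CLAIM (what is proved, stated in full; the proofs are below) =====
def Claim_equal_sum_until : Prop := ∀ (L : List Int) (i : Int), Dom_sum_until L i → Spec_sum_until L i (sum_until L i)

-- ===== LEMMAS AND PROOFS =====
lemma sum_until_alt_cons (num : Int) (rest : List Int) (i : Int) :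
    sum_until_alt (num :: rest) i = if num = i then 0 else num + sum_until_alt rest i := by
  by_cases h : num = i
  · subst h
    rw [if_pos rfl]
    simp only [sum_until_alt]
    rw [PySem.List.index?_cons_self]
    simp only [List.contains_cons, BEq.rfl, Bool.true_or, if_true]
    rw [PySem.List.slice_to_natCast]
    simp
  · rw [if_neg h]
    rcases hidx : PySem.List.index? rest i with _ | k
    · have hc : i ∉ rest := (PySem.List.index?_eq_none_iff rest i).mp hidx
      simp [sum_until_alt, hc, Ne.symm h]
    · have hmem : i ∈ rest := by
        by_contra hn
        rw [(PySem.List.index?_eq_none_iff rest i).mpr hn] at hidx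
        simp at hidx
      have h1 : PySem.List.index? (num :: rest) i = some (k + 1) := by
        rw [PySem.List.index?_cons_of_ne rest h, hidx]; rfl
      simp only [sum_until_alt]
      rw [h1, hidx]
      have hc1 : (num :: rest).contains i = true := by simp [hmem]
      have hc2 : rest.contains i = true := by simp [hmem]
      rw [if_pos hc1, if_pos hc2]
      simp only [PySem.List.slice_to_natCast]
      simp [List.take_succ_cons]

lemma sumUntilGo_eq (L : List Int) (i : Int) (su : Int) :
    sumUntilGo L i su = su + sum_until_alt L i := by
  induction L generalizing su with
  | nil => simp [sumUntilGo, sum_until_alt]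
  | cons num rest ih =>
    rw [sum_until_alt_cons]
    by_cases h : num = i
    · simp [sumUntilGo, h]
    · rw [sumUntilGo, if_pos h, ih, if_neg h]; ring

-- ===== VERDICT (by name: the statement is the Claim_ definition above) =====
theorem sum_until_spec : Claim_equal_sum_until := by
  intro L i _
  unfold Spec_sum_until sum_until
  simpa using sumUntilGo_eq L i 0
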